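-- pv_equiv track=rewrite | github.com/flame-code/FLAME | futile-suite-1.9.1/futile/tests/fldiff.py | n_digits
-- ===== SOURCE A (Python) =====
-- def n_digits(figure):
--     """Return the number of decimals of the given figure."""
--     n = 0
--     for ch in figure:
--         if ch == "e":
--             return n
--         elif ch in "0123456789":
--             n += 1
--     return n
-- ===== SOURCE B (Python) =====
-- def n_digits(figure):
--     """Return the number of decimals of the given figure."""
--     if 'e' in figure:
--         figure = figure[:figure.index('e')]
--     return sum(1 for c in figure if c in "0123456789")
-- ===== Notes on version B (the rewrite author's own statement) =====
-- stated objective: simpler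
-- what changed: Replaced the early-returning count loop by a two-phase computation: truncate the string at the first 'e', then count the decimal digits of the prefix in a separate pass.
import Mathlib
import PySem

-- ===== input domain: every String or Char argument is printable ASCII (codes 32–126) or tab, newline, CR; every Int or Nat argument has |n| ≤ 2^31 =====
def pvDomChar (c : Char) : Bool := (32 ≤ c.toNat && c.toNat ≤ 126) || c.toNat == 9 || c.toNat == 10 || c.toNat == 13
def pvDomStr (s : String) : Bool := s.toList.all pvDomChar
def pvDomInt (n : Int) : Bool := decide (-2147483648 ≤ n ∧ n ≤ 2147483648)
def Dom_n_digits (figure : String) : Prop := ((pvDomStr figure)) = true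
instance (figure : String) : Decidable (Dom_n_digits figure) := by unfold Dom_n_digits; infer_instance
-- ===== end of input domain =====

-- B truncates at the first 'e' and then counts digits in a second pass; same value, different decomposition.

-- ===== PORT A =====
-- the digit test `ch in "0123456789"` shared by both ports
def isDig (c : Char) : Bool := "0123456789".toList.contains c

-- the for-loop of A: accumulator n, early return on 'e'
def nDigitsLoop : List Char → Int → Int
  | [], n => n
  | c :: t, n =>
    if c = 'e' then n
    else if isDig c then nDigitsLoop t (n + 1)
    else nDigitsLoop t n

def n_digits (figure : String) : Int := nDigitsLoop figure.toList 0

-- ===== PORT B =====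
def n_digits_alt (figure : String) : Int :=
  let cs := figure.toList
  let cs' := if cs.contains 'e' then cs.take (cs.idxOf 'e') else cs
  ((cs'.filter isDig).length : Int)

-- ===== PRECONDITION & SPEC =====
def Spec_n_digits (figure : String) (out : Int) : Prop := out = n_digits_alt figure
instance (figure : String) (out : Int) : Decidable (Spec_n_digits figure out) := by unfold Spec_n_digits; infer_instance

-- ===== CLAIM (what is proved, stated in full; the proofs are below) =====
def Claim_equal_n_digits : Prop := ∀ (figure : String), Dom_n_digits figure → Spec_n_digits figure (n_digits figure)

-- ===== LEMMAS AND PROOFS =====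

-- value of B's computation, as a function of the char list
def altVal (cs : List Char) : Int :=
  (((if cs.contains 'e' then cs.take (cs.idxOf 'e') else cs).filter isDig).length : Int)

theorem altVal_cons_e (t : List Char) : altVal ('e' :: t) = 0 := by
  simp [altVal]

theorem altVal_cons (c : Char) (t : List Char) (hce : c ≠ 'e') :
    altVal (c :: t) = (if isDig c then 1 else 0) + altVal t := by
  have hmem : 'e' ∈ (c :: t) ↔ 'e' ∈ t := by
    constructor
    · intro h
      rcases List.mem_cons.mp h with h | h
      · exact absurd h.symm hce
      · exact h
    · exact fun h => List.mem_cons_of_mem c h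
  by_cases hct : 'e' ∈ t
  · have hidx : (c :: t).idxOf 'e' = t.idxOf 'e' + 1 := List.idxOf_cons_ne t hce
    have h1 : (c :: t).contains 'e' = true := by simp [List.contains_eq_mem, hmem, hct]
    have h2 : t.contains 'e' = true := by simp [List.contains_eq_mem, hct]
    rw [altVal, altVal, h1, h2, if_pos rfl, if_pos rfl, hidx, List.take_succ_cons,
      List.filter_cons]
    cases hd : isDig c <;> simp <;> omega
  · have h1 : (c :: t).contains 'e' = false := by simp [List.contains_eq_mem, hmem, hct]
    have h2 : t.contains 'e' = false := by simp [List.contains_eq_mem, hct]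
    rw [altVal, altVal, h1, h2]
    simp only [Bool.false_eq_true, if_false, List.filter_cons]
    cases hd : isDig c <;> simp <;> omega

theorem loop_eq_altVal (cs : List Char) (n : Int) : nDigitsLoop cs n = n + altVal cs := by
  induction cs generalizing n with
  | nil => simp [nDigitsLoop, altVal]
  | cons c t ih =>
    by_cases hce : c = 'e'
    · subst hce; simp [nDigitsLoop, altVal_cons_e]
    · rw [altVal_cons c t hce]
      cases hd : isDig c <;> simp [nDigitsLoop, hce, hd, ih] <;> omega

-- ===== VERDICT (by name: the statement is the Claim_ definition above) =====
theorem n_digits_spec : Claim_equal_n_digits := by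
  intro figure _
  show n_digits figure = n_digits_alt figure
  rw [n_digits, loop_eq_altVal]
  simp [n_digits_alt, altVal]
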